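-- pv_equiv track=rewrite | github.com/Mathayuz/sistemas-operacionais | atividade-pratica-03/alocacao.py | find_free_blocks
-- ===== SOURCE A (Python) =====
-- def find_free_blocks(memory):
--     freeBlocks = []
--     i = 0
--     while i < len(memory):
--         if memory[i] == 0:
--             start = i
--             while i < len(memory) and memory[i] == 0:
--                 i+=1
--             freeBlocks.append((start, i - start))
--         else:
--             i+=1
--
--     return freeBlocks
-- ===== SOURCE B (Python) =====
-- from itertools import groupby
--
-- def find_free_blocks(memory):
--     freeBlocks = []
--     offset = 0
--     for is_free, group in groupby(memory, key=lambda x: x == 0):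
--         length = sum(1 for _ in group)
--         if is_free:
--             freeBlocks.append((offset, length))
--         offset += length
--     return freeBlocks
-- ===== Notes on version B (the rewrite author's own statement) =====
-- stated objective: idiomatic
-- what changed: Replaces the manual index walk with nested while loops by an itertools.groupby pass over maximal runs keyed on freeness, folding (offset, result) over the runs.
import Mathlib
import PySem

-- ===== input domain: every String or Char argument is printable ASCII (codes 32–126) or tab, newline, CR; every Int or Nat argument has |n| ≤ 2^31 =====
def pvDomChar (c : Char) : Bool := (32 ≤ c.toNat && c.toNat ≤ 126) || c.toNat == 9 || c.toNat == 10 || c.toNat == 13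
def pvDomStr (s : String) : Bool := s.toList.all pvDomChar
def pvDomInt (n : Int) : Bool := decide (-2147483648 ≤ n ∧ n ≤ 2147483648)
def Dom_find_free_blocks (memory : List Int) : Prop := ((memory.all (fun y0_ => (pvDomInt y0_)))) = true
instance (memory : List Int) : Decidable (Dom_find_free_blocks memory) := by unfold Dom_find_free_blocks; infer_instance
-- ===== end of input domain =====

-- B replaces A's manual index walk (nested while loops) with an idiomatic groupby-over-runs
-- pass folding (offset, result); same cost, different decomposition.

-- ===== PORT A =====
-- inner while: 'while i < len(memory) and memory[i] == 0: i += 1', walking the suffix list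
def pvSkipA (i : Int) : List Int → Int × List Int
  | [] => (i, [])
  | x :: xs => if x = 0 then pvSkipA (i + 1) xs else (i, x :: xs)

theorem pvSkipA_len_le (i : Int) (xs : List Int) : (pvSkipA i xs).2.length ≤ xs.length := by
  induction xs generalizing i with
  | nil => simp [pvSkipA]
  | cons x xs ih =>
    by_cases h : x = 0
    · simp only [pvSkipA, if_pos h]
      exact le_trans (ih _) (by simp)
    · simp [pvSkipA, if_neg h]

-- outer while over the remaining suffix, i tracking the current index
def pvLoopA (i : Int) (acc : List (Int × Int)) : List Int → List (Int × Int)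
  | [] => acc
  | x :: xs =>
    if x = 0 then
      let r := pvSkipA (i + 1) xs
      pvLoopA r.1 (acc ++ [(i, r.1 - i)]) r.2
    else
      pvLoopA (i + 1) acc xs
termination_by l => l.length
decreasing_by
  · exact Nat.lt_succ_of_le (pvSkipA_len_le _ _)
  · simp

def find_free_blocks (memory : List Int) : List (Int × Int) := pvLoopA 0 [] memory

-- ===== PORT B =====
-- itertools.groupby(memory, key=lambda x: x == 0): maximal runs of equal key
def pvRunsB : List Int → List (List Int)
  | [] => []
  | x :: xs =>
    let p : Int → Bool := fun y => decide (y = 0) == decide (x = 0)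
    (x :: xs.takeWhile p) :: pvRunsB (xs.dropWhile p)
termination_by l => l.length
decreasing_by
  exact Nat.lt_succ_of_le (List.length_dropWhile_le _ _)

def find_free_blocks_alt (memory : List Int) : List (Int × Int) :=
  ((pvRunsB memory).foldl
    (fun st g =>
      (st.1 + (g.length : Int),
       if g.headD 1 = 0 then st.2 ++ [(st.1, (g.length : Int))] else st.2))
    ((0 : Int), ([] : List (Int × Int)))).2

-- ===== PRECONDITION & SPEC =====
def Spec_find_free_blocks (memory : List Int) (out : List (Int × Int)) : Prop := out = find_free_blocks_alt memory
instance (memory : List Int) (out : List (Int × Int)) : Decidable (Spec_find_free_blocks memory out) := by unfold Spec_find_free_blocks; infer_instance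

-- ===== CLAIM (what is proved, stated in full; the proofs are below) =====
def Claim_equal_find_free_blocks : Prop := ∀ (memory : List Int), Dom_find_free_blocks memory → Spec_find_free_blocks memory (find_free_blocks memory)

-- ===== LEMMAS AND PROOFS =====

def pvStepB : Int × List (Int × Int) → List Int → Int × List (Int × Int) :=
  fun st g =>
    (st.1 + (g.length : Int),
     if g.headD 1 = 0 then st.2 ++ [(st.1, (g.length : Int))] else st.2)

theorem pvRunsB_cons_zero (xs : List Int) :
    pvRunsB (0 :: xs) = (0 :: xs.takeWhile (fun y => decide (y = 0))) ::
      pvRunsB (xs.dropWhile (fun y => decide (y = 0))) := by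
  rw [pvRunsB]; simp

theorem pvRunsB_cons_nonzero (x : Int) (h : x ≠ 0) (xs : List Int) :
    pvRunsB (x :: xs) = (x :: xs.takeWhile (fun y => !decide (y = 0))) ::
      pvRunsB (xs.dropWhile (fun y => !decide (y = 0))) := by
  rw [pvRunsB]; simp [h]

theorem pvSkipA_eq (i : Int) (xs : List Int) :
    pvSkipA i xs = (i + ((xs.takeWhile (fun y => decide (y = 0))).length : Int),
                    xs.dropWhile (fun y => decide (y = 0))) := by
  induction xs generalizing i with
  | nil => simp [pvSkipA]
  | cons x xs ih =>
    by_cases h : x = 0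
    · subst h
      rw [pvSkipA, if_pos rfl, ih]
      simp only [List.takeWhile, List.dropWhile, decide_true, List.length_cons]
      refine Prod.ext ?_ rfl
      push_cast; ring
    · rw [pvSkipA, if_neg h]
      simp [List.takeWhile, List.dropWhile, h]

theorem pvLoopA_nonzero_run (g : List Int) (hg : ∀ y ∈ g, y ≠ 0) :
    ∀ (i : Int) (acc : List (Int × Int)) (rest : List Int),
    pvLoopA i acc (g ++ rest) = pvLoopA (i + (g.length : Int)) acc rest := by
  induction g with
  | nil => intro i acc rest; simp
  | cons x g ih =>
    intro i acc rest
    have hx : x ≠ 0 := hg x (by simp)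
    have h1 : pvLoopA i acc (x :: (g ++ rest)) = pvLoopA (i + 1) acc (g ++ rest) := by
      rw [pvLoopA, if_neg hx]
    have h2 : i + 1 + (g.length : Int) = i + ((x :: g).length : Int) := by
      simp only [List.length_cons]; push_cast; ring
    rw [List.cons_append, h1, ih (fun y hy => hg y (by simp [hy])), h2]

theorem pvLoopA_eq_foldl (n : Nat) :
    ∀ (xs : List Int), xs.length ≤ n → ∀ (i : Int) (acc : List (Int × Int)),
    pvLoopA i acc xs = ((pvRunsB xs).foldl pvStepB (i, acc)).2 := by
  induction n with
  | zero =>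
    intro xs hxs i acc
    have : xs = [] := List.eq_nil_of_length_eq_zero (Nat.le_zero.mp hxs)
    subst this
    simp [pvLoopA, pvRunsB]
  | succ n ih =>
    intro xs hxs i acc
    match xs with
    | [] => simp [pvLoopA, pvRunsB]
    | x :: xs =>
      by_cases h : x = 0
      · subst h
        rw [pvRunsB_cons_zero, List.foldl_cons]
        have hloop : pvLoopA i acc ((0:Int) :: xs) =
            pvLoopA (pvSkipA (i+1) xs).1 (acc ++ [(i, (pvSkipA (i+1) xs).1 - i)]) (pvSkipA (i+1) xs).2 := by
          rw [pvLoopA, if_pos rfl]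
        have hlen : (xs.dropWhile (fun y => decide (y = 0))).length ≤ n := by
          have := List.length_dropWhile_le (fun y => decide (y = (0:Int))) xs
          simp at hxs; omega
        rw [hloop, pvSkipA_eq, ih _ hlen]
        have hstep : pvStepB (i, acc) ((0:Int) :: xs.takeWhile (fun y => decide (y = 0))) =
            (i + 1 + ((xs.takeWhile (fun y => decide (y = 0))).length : Int),
             acc ++ [(i, i + 1 + ((xs.takeWhile (fun y => decide (y = 0))).length : Int) - i)]) := by
          have hc : (((xs.takeWhile (fun y => decide (y = 0))).length + 1 : Nat) : Int)
              = i + 1 + ((xs.takeWhile (fun y => decide (y = 0))).length : Int) - i := by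
            push_cast; ring
          refine Prod.ext ?_ ?_
          · simp only [pvStepB, List.length_cons]; push_cast; ring
          · simp only [pvStepB, List.headD_cons, List.length_cons, hc, if_true]
        rw [hstep]
      · rw [pvRunsB_cons_nonzero x h, List.foldl_cons]
        have hxxs : x :: xs = (x :: xs.takeWhile (fun y => !decide (y = 0))) ++
                              xs.dropWhile (fun y => !decide (y = 0)) := by
          simp [List.takeWhile_append_dropWhile]
        have hall : ∀ y ∈ x :: xs.takeWhile (fun y => !decide (y = 0)), y ≠ 0 := by
          intro y hy
          rcases List.mem_cons.mp hy with hy | hy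
          · exact hy ▸ h
          · simpa using List.mem_takeWhile_imp hy
        have hlen : (xs.dropWhile (fun y => !decide (y = 0))).length ≤ n := by
          have := List.length_dropWhile_le (fun y => !decide (y = (0:Int))) xs
          simp at hxs; omega
        conv_lhs => rw [hxxs]
        rw [pvLoopA_nonzero_run _ hall, ih _ hlen]
        have hstep : pvStepB (i, acc) (x :: xs.takeWhile (fun y => !decide (y = 0))) =
            (i + ((x :: xs.takeWhile (fun y => !decide (y = 0))).length : Int), acc) := by
          simp [pvStepB, h]
        rw [hstep]

-- ===== VERDICT (by name: the statement is the Claim_ definition above) =====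
theorem find_free_blocks_spec : Claim_equal_find_free_blocks := by
  intro memory _
  show find_free_blocks memory = find_free_blocks_alt memory
  unfold find_free_blocks find_free_blocks_alt
  exact pvLoopA_eq_foldl memory.length memory le_rfl 0 []
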